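-- pv_equiv track=rewrite | github.com/nedbat/adventofcode2019 | day08.py | flatten_layers
-- ===== SOURCE A (Python) =====
-- def flatten_layers(image):
--     wide = len(image[0][0])
--     tall = len(image[0])
--     flat = ["2" * wide for _ in range(tall)]
--
--     for layer in reversed(image):
--         next_flat = []
--         for frow, lrow in zip(flat, layer):
--             next_row = "".join(f if l == "2" else l for f, l in zip(frow, lrow))
--             next_flat.append(next_row)
--         flat = next_flat
--
--     return flat
-- ===== SOURCE B (Python) =====
-- def flatten_layers(image):
--     canvas = ["2" * len(image[0][0])] * len(image[0])
--
--     def pixel(stack):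
--         for p in stack:
--             if p != "2":
--                 return p
--         return "2"
--
--     return [
--         "".join(map(pixel, zip(*rows)))
--         for rows in zip(*image, canvas)
--     ]
-- ===== Notes on version B (the rewrite author's own statement) =====
-- stated objective: alternative
-- what changed: Replaces A's whole-image back-to-front overwrite fold with a transpose into per-pixel stacks (layers over a transparent backing canvas of the image's nominal size) whose first opaque value is taken; Pre_ excludes only the inputs where both programs raise IndexError at image[0][0] (empty image or empty first layer).
import Mathlib
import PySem

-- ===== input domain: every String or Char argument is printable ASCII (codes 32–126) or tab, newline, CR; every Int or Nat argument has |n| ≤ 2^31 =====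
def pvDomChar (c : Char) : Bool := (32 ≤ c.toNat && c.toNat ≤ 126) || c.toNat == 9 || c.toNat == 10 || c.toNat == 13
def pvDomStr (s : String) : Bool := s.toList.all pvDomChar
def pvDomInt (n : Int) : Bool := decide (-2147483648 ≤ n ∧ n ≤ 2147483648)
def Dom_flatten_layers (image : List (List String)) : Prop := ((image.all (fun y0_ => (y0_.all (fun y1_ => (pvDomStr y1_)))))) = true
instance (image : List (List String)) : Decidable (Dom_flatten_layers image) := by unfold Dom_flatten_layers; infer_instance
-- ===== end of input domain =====

-- B stacks the layers on a transparent backing canvas, transposes to per-pixel stacks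
-- and takes each stack's first opaque value (alternative decomposition, similar cost).

-- ===== PORT A =====
-- "".join(f if l == "2" else l for f, l in zip(frow, lrow))
def combineRow (frow lrow : String) : String :=
  String.ofList (List.zipWith (fun f l => if l = '2' then f else l) frow.toList lrow.toList)

def flatten_layers (image : List (List String)) : List String :=
  let wide := ((image.headD []).headD "").toList.length
  let tall := (image.headD []).length
  let flat0 := List.replicate tall (String.ofList (List.replicate wide '2'))
  image.reverse.foldl (fun flat layer => List.zipWith combineRow flat layer) flat0

-- ===== PORT B =====
-- Python's zip(*ls): tuples of the i-th elements, truncated at the shortest list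
-- (ported as the library call's contract; exact for every ls ≠ [])
def pyZipStar {α : Type} (ls : List (List α)) : List (List α) :=
  match ls with
  | [] => []
  | l0 :: rest =>
      let n := rest.foldr (fun l m => min l.length m) l0.length
      (List.range n).map (fun i => ls.filterMap (fun l => l[i]?))

-- def pixel(stack): first p != "2", else "2"
def pixel (stack : List Char) : Char :=
  match stack with
  | [] => '2'
  | p :: rest => if p ≠ '2' then p else pixel rest

def flatten_layers_alt (image : List (List String)) : List String :=
  let canvas := List.replicate (image.headD []).length
      (String.ofList (List.replicate ((image.headD []).headD "").toList.length '2'))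
  (pyZipStar (image ++ [canvas])).map (fun rows =>
    String.ofList ((pyZipStar (rows.map String.toList)).map pixel))

-- ===== PRECONDITION & SPEC =====
-- Pre_ excludes exactly the inputs where A raises IndexError at image[0][0]:
-- an empty image or an image whose first layer has no rows.
def Pre_flatten_layers (image : List (List String)) : Prop :=
  image ≠ [] ∧ image.headD [] ≠ []
instance (image : List (List String)) : Decidable (Pre_flatten_layers image) := by
  unfold Pre_flatten_layers; infer_instance

def pvWitness_flatten_layers : List (List String) := [["012", "120"], ["201", "222"]]

def Spec_flatten_layers (image : List (List String)) (out : List String) : Prop := out = flatten_layers_alt image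
instance (image : List (List String)) (out : List String) : Decidable (Spec_flatten_layers image out) := by unfold Spec_flatten_layers; infer_instance

-- ===== CLAIM (what is proved, stated in full; the proofs are below) =====
def Claim_equal_flatten_layers : Prop := ∀ (image : List (List String)), Dom_flatten_layers image → Pre_flatten_layers image → Spec_flatten_layers image (flatten_layers image)

-- ===== LEMMAS AND PROOFS =====

-- first-opaque scan with an arbitrary transparent-fallback value (characterizes A's fold)
def foD (image : List (List String)) (r c : Nat) (d : Char) : Char :=
  match image with
  | [] => d
  | layer :: rest =>
      let l := ((layer.getD r "").toList).getD c '2'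
      if l ≠ '2' then l else foD rest r c d

-- number of rows / row length of A's fold result, as foldr of min
def nRows (image : List (List String)) (init : Nat) : Nat :=
  List.foldr (fun layer n => min layer.length n) init image

def nCols (image : List (List String)) (r init : Nat) : Nat :=
  List.foldr (fun layer n => min ((layer.getD r "").toList.length) n) init image

lemma foldr_min_le {α : Type} (f : α → Nat) (init : Nat) (l : List α) :
    List.foldr (fun x n => min (f x) n) init l ≤ init := by
  induction l with
  | nil => simp
  | cons x t ih => simp only [List.foldr]; omega

lemma foldr_min_min {α : Type} (f : α → Nat) (a b : Nat) (l : List α) :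
    List.foldr (fun x n => min (f x) n) (min a b) l
      = min b (List.foldr (fun x n => min (f x) n) a l) := by
  induction l with
  | nil => simp [Nat.min_comm]
  | cons x t ih => simp only [List.foldr, ih]; omega

lemma foldr_min_le_mem {α : Type} (f : α → Nat) (init : Nat) (l : List α)
    (x : α) (hx : x ∈ l) :
    List.foldr (fun x n => min (f x) n) init l ≤ f x := by
  induction l with
  | nil => cases hx
  | cons y t ih =>
      rcases List.mem_cons.mp hx with rfl | h
      · simp only [List.foldr]; omega
      · have := ih h; simp only [List.foldr]; omega

lemma getD_range_map {α : Type} (l : List α) (d : α) :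
    (List.range l.length).map (fun c => l.getD c d) = l := by
  apply List.ext_getElem
  · simp
  · intro i h1 h2
    simp only [List.getElem_map, List.getElem_range]
    exact List.getD_eq_getElem l d h2

lemma zipWith_map_range {α β γ : Type} (f : α → β → γ) (g : Nat → α) (n : Nat)
    (ys : List β) (d : β) :
    List.zipWith f ((List.range n).map g) ys
      = (List.range (min ys.length n)).map (fun i => f (g i) (ys.getD i d)) := by
  apply List.ext_getElem
  · simp [Nat.min_comm]
  · intro i h1 h2
    have hy : i < ys.length := by simp at h2; omega
    simp only [List.getElem_zipWith, List.getElem_map, List.getElem_range]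
    rw [List.getD_eq_getElem ys d hy]

-- the main characterization of A's layer fold, pixel by pixel
lemma fold_characterization (image : List (List String)) (flat : List String) :
    List.foldr (fun layer f => List.zipWith combineRow f layer) flat image
      = (List.range (nRows image flat.length)).map (fun r =>
          String.ofList ((List.range (nCols image r ((flat.getD r "").toList.length))).map
            (fun c => foD image r c (((flat.getD r "").toList).getD c '2')))) := by
  induction image generalizing flat with
  | nil =>
      simp only [List.foldr, nRows, nCols, foD]
      apply List.ext_getElem
      · simp
      · intro i h1 h2
        simp only [List.getElem_map, List.getElem_range]
        rw [getD_range_map, String.ofList_toList, List.getD_eq_getElem flat "" h1]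
  | cons layer rest ih =>
      simp only [List.foldr, ih]
      rw [zipWith_map_range _ _ _ layer ""]
      simp only [nRows, nCols, List.foldr]
      refine List.map_congr_left ?_
      intro r hr
      simp only [combineRow, String.toList_ofList]
      rw [zipWith_map_range _ _ _ (layer.getD r "").toList '2']
      congr 1
      refine List.map_congr_left ?_
      intro c hc
      simp only [foD, ne_eq, ite_not]

-- B-side: the truncation length of zip(*ls)
def minlen {α : Type} (ls : List (List α)) : Nat :=
  match ls with
  | [] => 0
  | l0 :: rest => rest.foldr (fun l m => min l.length m) l0.length

lemma minlen_le_mem {α : Type} (ls : List (List α)) (l : List α) (hl : l ∈ ls) :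
    minlen ls ≤ l.length := by
  cases ls with
  | nil => cases hl
  | cons l0 rest =>
      rcases List.mem_cons.mp hl with rfl | h
      · exact foldr_min_le _ _ _
      · exact foldr_min_le_mem (fun l : List α => l.length) _ _ _ h

lemma filterMap_get_eq_map {α : Type} (ls : List (List α)) (i : Nat) (d : α)
    (h : ∀ l ∈ ls, i < l.length) :
    ls.filterMap (fun l => l[i]?) = ls.map (fun l => l.getD i d) := by
  induction ls with
  | nil => rfl
  | cons l0 rest ih =>
      have h0 : i < l0.length := h l0 List.mem_cons_self
      simp only [List.filterMap_cons, List.map_cons,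
        List.getElem?_eq_getElem h0, List.getD_eq_getElem l0 d h0]
      rw [ih (fun l hl => h l (List.mem_cons_of_mem _ hl))]

lemma pyZipStar_eq {α : Type} (ls : List (List α)) (hne : ls ≠ []) (d : α) :
    pyZipStar ls = (List.range (minlen ls)).map (fun i => ls.map (fun l => l.getD i d)) := by
  cases ls with
  | nil => exact absurd rfl hne
  | cons l0 rest =>
      simp only [pyZipStar, minlen]
      refine List.map_congr_left ?_
      intro i hi
      exact filterMap_get_eq_map _ i d (fun l hl =>
        lt_of_lt_of_le (List.mem_range.mp hi) (minlen_le_mem (l0 :: rest) l hl))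

lemma minlen_map_append {α γ : Type} (f : α → List γ) (l0 : α) (rest : List α)
    (x : List γ) :
    minlen ((l0 :: rest).map f ++ [x])
      = List.foldr (fun l m => min (f l).length m) x.length (l0 :: rest) := by
  simp only [List.map_cons, List.cons_append, minlen, List.foldr_append,
    List.foldr_map, List.foldr_cons, List.foldr_nil]
  rw [show (min x.length (f l0).length) = min x.length (f l0).length from rfl,
    foldr_min_min (fun l => (f l).length) x.length (f l0).length rest]

lemma getD_replicate_self {α : Type} (n c : Nat) (a : α) :
    (List.replicate n a).getD c a = a := by
  by_cases h : c < n
  · exact List.getD_replicate _ h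
  · exact List.getD_eq_default _ _ (by simpa using h)

-- the per-pixel stack scan (canvas pixel '2' last) equals the first-opaque value
lemma pixel_scan (image : List (List String)) (r c : Nat) :
    pixel ((image.map (fun l => ((l.getD r "").toList).getD c '2')) ++ ['2'])
      = foD image r c '2' := by
  induction image with
  | nil => rfl
  | cons layer rest ih =>
      simp only [List.map_cons, List.cons_append, pixel, foD, ne_eq]
      rw [ih]

-- ===== VERDICT (by name: the statement is the Claim_ definition above) =====
theorem flatten_layers_spec : Claim_equal_flatten_layers := by
  intro image _ hpre
  obtain ⟨hne, -⟩ := hpre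
  obtain ⟨l0, rest, rfl⟩ := List.exists_cons_of_ne_nil hne
  unfold Spec_flatten_layers flatten_layers flatten_layers_alt
  simp only [List.headD_cons]
  set wide := (l0.headD "").toList.length with hwide
  set tall := l0.length with htall
  set canvas := List.replicate tall (String.ofList (List.replicate wide '2')) with hcanvas
  rw [List.foldl_reverse, fold_characterization]
  rw [pyZipStar_eq ((l0 :: rest) ++ [canvas]) (by simp) ("" : String)]
  have hcanlen : canvas.length = tall := by simp [hcanvas]
  have houter : minlen ((l0 :: rest) ++ [canvas]) = nRows (l0 :: rest) tall := by
    have h := minlen_map_append (fun l : List String => l) l0 rest canvas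
    simp only [List.map_id'] at h
    rw [h, hcanlen]
    rfl
  rw [hcanlen, houter, List.map_map]
  refine List.map_congr_left ?_
  intro r hr
  have hrN : r < nRows (l0 :: rest) tall := List.mem_range.mp hr
  have hrtall : r < tall := lt_of_lt_of_le hrN (foldr_min_le _ tall _)
  simp only [Function.comp]
  have hrowmap : ((l0 :: rest) ++ [canvas]).map (fun l => l.getD r "")
      = (l0 :: rest).map (fun l => l.getD r "") ++ [canvas.getD r ""] := by
    simp
  have hcrow : canvas.getD r "" = String.ofList (List.replicate wide '2') := by
    rw [hcanvas]; exact List.getD_replicate _ hrtall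
  rw [hrowmap, hcrow]
  rw [pyZipStar_eq _ (by simp) ('2' : Char)]
  have hinner : minlen (((l0 :: rest).map (fun l => l.getD r "")
        ++ [String.ofList (List.replicate wide '2')]).map String.toList)
      = nCols (l0 :: rest) r wide := by
    have h := minlen_map_append (fun l : List String => (l.getD r "").toList) l0 rest
      ((String.ofList (List.replicate wide '2')).toList)
    simp only [List.map_cons, List.map_append, List.map_map, List.map_nil,
      Function.comp_def, List.cons_append] at h ⊢
    rw [h]
    simp only [String.toList_ofList, List.length_replicate, nCols]
  rw [hinner]
  simp only [String.toList_ofList, List.length_replicate]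
  congr 1
  rw [List.map_map]
  refine List.map_congr_left ?_
  intro c hc
  simp only [Function.comp]
  have hcN : c < nCols (l0 :: rest) r wide := List.mem_range.mp hc
  have hcwide : c < wide := lt_of_lt_of_le hcN (foldr_min_le _ wide _)
  have hstack : (((l0 :: rest).map (fun l => l.getD r "")
        ++ [String.ofList (List.replicate wide '2')]).map String.toList).map
        (fun l => l.getD c '2')
      = ((l0 :: rest).map (fun l => ((l.getD r "").toList).getD c '2')) ++ ['2'] := by
    simp only [List.map_append, List.map_map, List.map_cons, List.map_nil,
      Function.comp_def, String.toList_ofList]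
    rw [List.getD_replicate _ hcwide]
  rw [hstack, pixel_scan, getD_replicate_self]
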